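-- pv_equiv track=rewrite | github.com/eladkap/leetcode | main.py | find_max_distance_between_identical_chars
-- ===== SOURCE A (Python) =====
-- def find_max_distance_between_identical_chars(s: str):
--     d = {}
--     max_distnace = 0
--     max_ch = s[0]
--     for i, ch in enumerate(s):
--         if ch not in d.keys():
--             d[ch] = i
--         else:
--             j = d[ch]
--             if abs(j - i) > max_distnace:
--                 max_distnace = abs(j - i)
--                 max_ch = ch
--     return max_distnace, max_ch
-- ===== SOURCE B (Python) =====
-- def find_max_distance_between_identical_chars(s: str):
--     first = {}
--     last = {}
--     for i, ch in enumerate(s):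
--         if ch not in first:
--             first[ch] = i
--         last[ch] = i
--     max_distance = 0
--     max_ch = s[0]
--     for ch, f in first.items():
--         dist = last[ch] - f
--         if dist > max_distance:
--             max_distance = dist
--             max_ch = ch
--     return max_distance, max_ch
-- ===== Notes on version B (the rewrite author's own statement) =====
-- stated objective: alternative
-- what changed: A tracks a running maximum while scanning positions, comparing each position against the stored first occurrence; B first builds first/last occurrence dicts in one pass and then takes the maximum of last-first over the distinct characters (per-distinct-char second loop instead of per-position bookkeeping).
import Mathlib
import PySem

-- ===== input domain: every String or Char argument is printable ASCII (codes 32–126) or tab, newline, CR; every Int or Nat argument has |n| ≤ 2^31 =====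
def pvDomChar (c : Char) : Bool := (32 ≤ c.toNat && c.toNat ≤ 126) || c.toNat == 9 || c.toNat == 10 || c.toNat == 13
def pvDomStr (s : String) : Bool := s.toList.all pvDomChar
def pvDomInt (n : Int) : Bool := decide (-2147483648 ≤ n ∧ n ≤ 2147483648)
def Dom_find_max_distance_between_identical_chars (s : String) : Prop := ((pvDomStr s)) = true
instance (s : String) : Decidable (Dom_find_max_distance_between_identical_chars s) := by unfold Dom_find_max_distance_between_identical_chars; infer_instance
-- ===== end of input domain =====

-- B replaces A's running-maximum scan by a first/last-occurrence dict pass followed by a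
-- maximum over the distinct characters; equivalence is proved on non-empty strings (both raise on "").

-- ===== PORT A =====
-- one loop step of A: d holds the first occurrence of each char seen so far
def fmdAStep (st : PySem.Dict Char Int × Int × Char) (p : Int × Char) :
    PySem.Dict Char Int × Int × Char :=
  match st.1.get? p.2 with
  | none => (st.1.insert p.2 p.1, st.2)
  | some j => if |j - p.1| > st.2.1 then (st.1, |j - p.1|, p.2) else st

def find_max_distance_between_identical_chars (s : String) : Int × String :=
  match s.toList with
  | [] => (0, "")   -- Python raises IndexError at s[0]; excluded by Pre_
  | c0 :: _ =>
    let st := (PySem.List.enumerate s.toList 0).foldl fmdAStep (PySem.Dict.empty, 0, c0)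
    (st.2.1, String.ofList [st.2.2])

-- ===== PORT B =====
-- first pass of B: builds (first, last) occurrence dicts
def fmdPass1 (fl : PySem.Dict Char Int × PySem.Dict Char Int) (p : Int × Char) :
    PySem.Dict Char Int × PySem.Dict Char Int :=
  ((if fl.1.contains p.2 then fl.1 else fl.1.insert p.2 p.1), fl.2.insert p.2 p.1)

-- second pass of B: maximum of last[ch] - first[ch] over first.items()
def fmdPass2 (last : PySem.Dict Char Int) (a : Int × Char) (p : Char × Int) : Int × Char :=
  if last.getD p.1 0 - p.2 > a.1 then (last.getD p.1 0 - p.2, p.1) else a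

def find_max_distance_between_identical_chars_alt (s : String) : Int × String :=
  let fl := (PySem.List.enumerate s.toList 0).foldl fmdPass1 (PySem.Dict.empty, PySem.Dict.empty)
  match s.toList with
  | [] => (0, "")   -- Python raises IndexError at s[0]; excluded by Pre_
  | c0 :: _ =>
    let r := fl.1.items.foldl (fmdPass2 fl.2) (0, c0)
    (r.1, String.ofList [r.2])

-- ===== PRECONDITION & SPEC =====
-- Pre_ excludes only the empty string, on which both A and B raise IndexError (s[0]).
def Pre_find_max_distance_between_identical_chars (s : String) : Prop := s.toList ≠ []
instance (s : String) : Decidable (Pre_find_max_distance_between_identical_chars s) := by unfold Pre_find_max_distance_between_identical_chars; infer_instance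
def pvWitness_find_max_distance_between_identical_chars : String := "abcab"

def Spec_find_max_distance_between_identical_chars (s : String) (out : Int × String) : Prop := out = find_max_distance_between_identical_chars_alt s
instance (s : String) (out : Int × String) : Decidable (Spec_find_max_distance_between_identical_chars s out) := by unfold Spec_find_max_distance_between_identical_chars; infer_instance

-- ===== CLAIM (what is proved, stated in full; the proofs are below) =====
def Claim_equal_find_max_distance_between_identical_chars : Prop := ∀ (s : String), Dom_find_max_distance_between_identical_chars s → Pre_find_max_distance_between_identical_chars s → Spec_find_max_distance_between_identical_chars s (find_max_distance_between_identical_chars s)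

-- ===== LEMMAS AND PROOFS =====

-- second-pass fold facts
theorem pass2_acc_le (last : PySem.Dict Char Int) (K : List (Char × Int)) (a : Int × Char) :
    a.1 ≤ (K.foldl (fmdPass2 last) a).1 := by
  induction K generalizing a with
  | nil => simp
  | cons p K ih =>
    simp only [List.foldl_cons]
    refine le_trans ?_ (ih _)
    unfold fmdPass2; split
    · simp_all; omega
    · simp

theorem pass2_const (last : PySem.Dict Char Int) (K : List (Char × Int)) (a : Int × Char)
    (h : ∀ p ∈ K, last.getD p.1 0 - p.2 ≤ a.1) : K.foldl (fmdPass2 last) a = a := by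
  induction K generalizing a with
  | nil => simp
  | cons p K ih =>
    simp only [List.foldl_cons]
    have hp := h p (by simp)
    have : fmdPass2 last a p = a := by unfold fmdPass2; split <;> [omega; rfl]
    rw [this]; exact ih _ (fun q hq => h q (by simp [hq]))

theorem pass2_bound (last : PySem.Dict Char Int) (K : List (Char × Int)) (a : Int × Char)
    (B : Int) (ha : a.1 ≤ B) (h : ∀ p ∈ K, last.getD p.1 0 - p.2 ≤ B) :
    (K.foldl (fmdPass2 last) a).1 ≤ B := by
  induction K generalizing a with
  | nil => simpa
  | cons p K ih =>
    simp only [List.foldl_cons]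
    refine ih _ ?_ (fun q hq => h q (by simp [hq]))
    have hp := h p (by simp)
    unfold fmdPass2; split <;> simp_all
  
theorem pass2_congr (last last' : PySem.Dict Char Int) (K : List (Char × Int)) (a : Int × Char)
    (h : ∀ p ∈ K, last'.getD p.1 0 = last.getD p.1 0) :
    K.foldl (fmdPass2 last') a = K.foldl (fmdPass2 last) a := by
  induction K generalizing a with
  | nil => rfl
  | cons p K ih =>
    simp only [List.foldl_cons]
    rw [show fmdPass2 last' a p = fmdPass2 last a p by unfold fmdPass2; rw [h p (by simp)]]
    exact ih _ (fun q hq => h q (by simp [hq]))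

-- on a fresh character the second pass is unchanged: the new entry contributes distance 0
theorem pass2_fresh (F L : PySem.Dict Char Int) (c : Char) (k : Int) (c0 : Char)
    (hget : F.get? c = none) :
    ((F.insert c k).items.foldl (fmdPass2 (L.insert c k)) (0, c0)) = F.items.foldl (fmdPass2 L) (0, c0) := by
  have hcont : F.contains c = false := by
    rw [PySem.Dict.contains_eq_isSome_get?, hget]; rfl
  have hne : ∀ p ∈ F.items, p.1 ≠ c := by
    intro p hp hpc
    have := PySem.Dict.mem_keys_of_mem_items F hp
    rw [hpc] at this
    rw [PySem.Dict.get?_eq_none_iff_not_mem_keys] at hget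
    exact hget this
  rw [PySem.Dict.items_insert_of_not_contains F k hcont, List.foldl_append]
  rw [pass2_congr _ _ _ _ (fun p hp => PySem.Dict.getD_insert_of_ne L k 0 (hne p hp))]
  simp only [List.foldl_cons, List.foldl_nil]
  have h0 := pass2_acc_le L F.items (0, c0)
  unfold fmdPass2 at h0 ⊢
  rw [PySem.Dict.getD_insert_self]
  rw [if_neg (by simp only; omega)]

-- on a repeated character the second pass equals A's running-max update
theorem pass2_repeat (F L : PySem.Dict Char Int) (c : Char) (j k : Int) (c0 : Char)
    (hget : F.get? c = some j)
    (hP : F.items.Pairwise (fun a b => a.2 < b.2))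
    (hV : ∀ p ∈ F.items, 0 ≤ p.2 ∧ p.2 < k ∧ ∃ lv, L.get? p.1 = some lv ∧ p.2 ≤ lv ∧ lv < k)
    (hN : F.keys.Nodup) :
    F.items.foldl (fmdPass2 (L.insert c k)) (0, c0) =
      (if k - j > (F.items.foldl (fmdPass2 L) (0, c0)).1
        then (k - j, c) else F.items.foldl (fmdPass2 L) (0, c0)) := by
  have hmem : (c, j) ∈ F.items := PySem.Dict.mem_items_of_get?_eq_some F hget
  obtain ⟨K1, K2, hsplit⟩ := List.append_of_mem hmem
  have hkeys : (K1.map Prod.fst ++ c :: K2.map Prod.fst).Nodup := by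
    have : F.keys = K1.map Prod.fst ++ c :: K2.map Prod.fst := by
      simp only [PySem.Dict.keys, hsplit, List.map_append, List.map_cons]
    rw [← this]; exact hN
  have hne1 : ∀ p ∈ K1, p.1 ≠ c := by
    intro p hp hpc
    rcases List.nodup_append.mp hkeys with ⟨-, -, hdis⟩
    exact hdis p.1 (List.mem_map.mpr ⟨p, hp, rfl⟩) c (by simp) hpc
  have hne2 : ∀ p ∈ K2, p.1 ≠ c := by
    intro p hp hpc
    have h2 := (List.nodup_append.mp hkeys).2.1
    rw [List.nodup_cons] at h2
    exact h2.1 (List.mem_map.mpr ⟨p, hp, hpc⟩)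
  -- facts about values
  have hVc := hV (c, j) hmem
  obtain ⟨hj0, hjk, lc, hlc, hjlc, hlck⟩ := hVc
  have hK2lt : ∀ p ∈ K2, L.getD p.1 0 - p.2 < k - j := by
    intro p hp
    have hpj : j < p.2 := by
      rw [hsplit] at hP
      have := (List.pairwise_append.mp hP).2.1
      exact (List.pairwise_cons.mp this).1 p hp
    obtain ⟨-, -, lv, hlv, -, hlvk⟩ := hV p (by rw [hsplit]; simp [hp])
    rw [PySem.Dict.getD_eq_get?_getD, hlv]
    simp only [Option.getD_some]
    omega
  have hK1congr : ∀ p ∈ K1, (L.insert c k).getD p.1 0 = L.getD p.1 0 :=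
    fun p hp => PySem.Dict.getD_insert_of_ne L k 0 (hne1 p hp)
  have hK2congr : ∀ p ∈ K2, (L.insert c k).getD p.1 0 = L.getD p.1 0 :=
    fun p hp => PySem.Dict.getD_insert_of_ne L k 0 (hne2 p hp)
  rw [hsplit]
  simp only [List.foldl_append, List.foldl_cons]
  rw [pass2_congr _ _ _ _ hK1congr]
  set a1 := K1.foldl (fmdPass2 L) (0, c0) with ha1
  have hstep' : fmdPass2 (L.insert c k) a1 (c, j) =
      if k - j > a1.1 then (k - j, c) else a1 := by
    unfold fmdPass2; rw [PySem.Dict.getD_insert_self]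
  have hstep : fmdPass2 L a1 (c, j) = if lc - j > a1.1 then (lc - j, c) else a1 := by
    unfold fmdPass2; rw [PySem.Dict.getD_eq_get?_getD, hlc]; rfl
  rw [hstep', hstep, pass2_congr _ _ _ _ hK2congr]
  by_cases hnew : k - j > a1.1
  · rw [if_pos hnew]
    rw [pass2_const _ _ _ (fun p hp => le_of_lt (lt_of_lt_of_le (hK2lt p hp) (by omega)))]
    have hb1 : (if lc - j > a1.1 then (lc - j, c) else a1).1 ≤ k - j - 1 := by
      split <;> simp <;> omega
    have hmd := pass2_bound L K2 _ (k - j - 1) hb1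
      (fun p hp => by have := hK2lt p hp; omega)
    rw [if_pos (by omega)]
  · rw [if_neg hnew]
    have hold : ¬ (lc - j > a1.1) := by omega
    rw [if_neg hold]
    have hge := pass2_acc_le L K2 a1
    rw [if_neg (by omega)]

-- the main loop invariant
theorem fmd_inv (c0 : Char) (l : List Char) :
    (((PySem.List.enumerate l 0).foldl fmdAStep (PySem.Dict.empty, 0, c0)).1
      = ((PySem.List.enumerate l 0).foldl fmdPass1 (PySem.Dict.empty, PySem.Dict.empty)).1)
    ∧ (((PySem.List.enumerate l 0).foldl fmdAStep (PySem.Dict.empty, 0, c0)).2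
      = (((PySem.List.enumerate l 0).foldl fmdPass1 (PySem.Dict.empty, PySem.Dict.empty)).1).items.foldl
          (fmdPass2 ((PySem.List.enumerate l 0).foldl fmdPass1 (PySem.Dict.empty, PySem.Dict.empty)).2) (0, c0))
    ∧ ((((PySem.List.enumerate l 0).foldl fmdPass1 (PySem.Dict.empty, PySem.Dict.empty)).1).items.Pairwise (fun a b => a.2 < b.2))
    ∧ (∀ p ∈ (((PySem.List.enumerate l 0).foldl fmdPass1 (PySem.Dict.empty, PySem.Dict.empty)).1).items,
        0 ≤ p.2 ∧ p.2 < (l.length : Int)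
        ∧ ∃ lv, (((PySem.List.enumerate l 0).foldl fmdPass1 (PySem.Dict.empty, PySem.Dict.empty)).2).get? p.1 = some lv
            ∧ p.2 ≤ lv ∧ lv < (l.length : Int))
    ∧ ((((PySem.List.enumerate l 0).foldl fmdPass1 (PySem.Dict.empty, PySem.Dict.empty)).1).keys.Nodup) := by
  induction l using List.reverseRecOn with
  | nil =>
    simp [PySem.List.enumerate_nil, PySem.Dict.empty, PySem.Dict.keys]
  | append_singleton l c ih =>
    obtain ⟨h1, h2, hP, hV, hN⟩ := ih
    simp only [PySem.List.enumerate_append, PySem.List.enumerate_cons, PySem.List.enumerate_nil,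
      List.foldl_append, List.foldl_cons, List.foldl_nil, zero_add, List.length_append,
      List.length_cons, List.length_nil] at *
    set st := List.foldl fmdAStep (PySem.Dict.empty, 0, c0) (PySem.List.enumerate l 0) with hst
    set fl := List.foldl fmdPass1 (PySem.Dict.empty, PySem.Dict.empty) (PySem.List.enumerate l 0) with hfl
    set k : Int := (l.length : Int) with hk
    have hcast : ((l.length + 1 : Nat) : Int) = k + 1 := by push_cast; rfl
    rw [hcast]
    cases hget : fl.1.get? c with
    | none =>
      have hcont : fl.1.contains c = false := by
        rw [PySem.Dict.contains_eq_isSome_get?, hget]; rfl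
      have hnotmem : c ∉ fl.1.keys := (PySem.Dict.get?_eq_none_iff_not_mem_keys fl.1 c).mp hget
      have hne : ∀ p ∈ fl.1.items, p.1 ≠ c := by
        intro p hp hpc
        exact hnotmem (hpc ▸ PySem.Dict.mem_keys_of_mem_items fl.1 hp)
      simp only [fmdAStep, fmdPass1, h1, hget, hcont, if_false, Bool.false_eq_true]
      refine ⟨by trivial, ?_, ?_, ?_, ?_⟩
      · rw [pass2_fresh fl.1 fl.2 c k c0 hget]; exact h2
      · rw [PySem.Dict.items_insert_of_not_contains fl.1 k hcont]
        rw [List.pairwise_append]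
        refine ⟨hP, List.pairwise_singleton _ _, ?_⟩
        intro a ha b hb
        simp only [List.mem_singleton] at hb
        subst hb
        exact (hV a ha).2.1
      · rw [PySem.Dict.items_insert_of_not_contains fl.1 k hcont]
        intro p hp
        rcases List.mem_append.mp hp with hold | hnew
        · obtain ⟨h0p, hpk, lv, hlv, hplv, hlvk⟩ := hV p hold
          refine ⟨h0p, by omega, lv, ?_, hplv, by omega⟩
          rw [PySem.Dict.get?_insert_of_ne fl.2 k (hne p hold), hlv]
        · simp only [List.mem_singleton] at hnew
          subst hnew
          refine ⟨by positivity, by omega, k, ?_, le_refl _, by omega⟩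
          exact PySem.Dict.get?_insert_self fl.2 c k
      · exact PySem.Dict.nodup_keys_insert fl.1 c k hN
    | some j =>
      have hcont : fl.1.contains c = true := by
        rw [PySem.Dict.contains_eq_isSome_get?, hget]; rfl
      have hmem : (c, j) ∈ fl.1.items := PySem.Dict.mem_items_of_get?_eq_some fl.1 hget
      obtain ⟨hj0, hjk, lc, hlc, hjlc, hlck⟩ := hV (c, j) hmem
      have habs : |j - k| = k - j := by
        rw [abs_sub_comm]; exact abs_of_nonneg (by omega)
      simp only [fmdAStep, fmdPass1, h1, hget, hcont, if_true]
      have hrep := pass2_repeat fl.1 fl.2 c j k c0 hget hP hV hN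
      refine ⟨?_, ?_, hP, ?_, hN⟩
      · split <;> simp [h1]
      · rw [hrep, ← habs]
        split <;> simp_all
      · intro p hp
        obtain ⟨h0p, hpk, lv, hlv, hplv, hlvk⟩ := hV p hp
        by_cases hpc : p.1 = c
        · have hpj : p.2 = j := by
            have hg : fl.1.get? p.1 = some p.2 :=
              PySem.Dict.get?_of_mem_items fl.1 (by exact Prod.mk.eta ▸ hp) hN
            rw [hpc, hget] at hg
            exact (Option.some.inj hg).symm
          refine ⟨h0p, by omega, k, ?_, by omega, by omega⟩
          rw [hpc]
          exact PySem.Dict.get?_insert_self fl.2 c k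
        · refine ⟨h0p, by omega, lv, ?_, hplv, by omega⟩
          rw [PySem.Dict.get?_insert_of_ne fl.2 k hpc, hlv]

-- ===== VERDICT (by name: the statement is the Claim_ definition above) =====
theorem find_max_distance_between_identical_chars_spec : Claim_equal_find_max_distance_between_identical_chars := by
  intro s _ hpre
  unfold Spec_find_max_distance_between_identical_chars
  unfold find_max_distance_between_identical_chars find_max_distance_between_identical_chars_alt
  cases hs : s.toList with
  | nil => exact absurd hs hpre
  | cons c0 rest =>
    exact congrArg (fun r => (r.1, String.ofList [r.2])) ((fmd_inv c0 (c0 :: rest)).2.1)
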